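-- pv_equiv track=rewrite | github.com/guiguiSCH68/TEEKO-AI-Project | Finished_Version/Heuristique.py | check_orientation_allies
-- ===== SOURCE A (Python) =====
-- def check_orientation_allies(liste_positions):
--
--     idx = 1
--
--     compteur_carre = 0
--     compteur_vertical = 1
--     compteur_horizontal = 1
--     compteur_diago_montante = 1
--     compteur_diago_descendante = 1
--
--     liste_orientation_valeur = []
--
--     couple_initial = liste_positions[0]
--     while idx < len(liste_positions):
--
--         temp_couple = liste_positions[idx]
--         # check horizontal ET vertical
--
--         if temp_couple[0] == couple_initial[ 0]:
--             compteur_horizontal += 1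
--
--         elif temp_couple[1] == couple_initial[1]:
--             compteur_vertical += 1
--         # end IF
--
--         if ((temp_couple[0] - 1) == (couple_initial[0]) and (temp_couple[1] + 1) == (couple_initial[1])) or (temp_couple[0] + 1) == (couple_initial[0]) and (temp_couple[1] - 1) == (couple_initial[1]):  # on check (x-1,y+1) ou (x+1,y-1)
--             compteur_diago_montante += 1  # diagonale qui monte comme ca: "/"
--
--         elif ((temp_couple[0] - 1) == (couple_initial[0]) and (temp_couple[1] - 1) == (couple_initial[1])) or ((temp_couple[0] + 1) == (couple_initial[0]) and (temp_couple[1] + 1) == (couple_initial[1])):compteur_diago_descendante += 1  # diagonale qui descend comme ca: "\"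
--
--         # end IF
--
--         couple_initial = temp_couple
--         idx += 1
--     # end WHILE
--
--     liste_longueurs = [compteur_vertical, compteur_horizontal, compteur_diago_descendante, compteur_diago_montante]
--     liste_longueurs.sort()
--
--     return liste_longueurs[-1]
-- ===== SOURCE B (Python) =====
-- def check_orientation_allies(liste_positions):
--     # Histogram of displacement vectors between consecutive positions;
--     # the four alignment lengths are read off the histogram afterwards.
--     histo = {}
--     prev = liste_positions[0]
--     for cur in liste_positions[1:]:
--         d = (cur[0] - prev[0], cur[1] - prev[1])
--         histo[d] = histo.get(d, 0) + 1
--         prev = cur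
--     horizontal = 1 + sum(v for (dx, dy), v in histo.items() if dx == 0)
--     vertical = 1 + sum(v for (dx, dy), v in histo.items() if dx != 0 and dy == 0)
--     montante = 1 + histo.get((1, -1), 0) + histo.get((-1, 1), 0)
--     descendante = 1 + histo.get((1, 1), 0) + histo.get((-1, -1), 0)
--     return max(vertical, horizontal, descendante, montante)
-- ===== Notes on version B (the rewrite author's own statement) =====
-- stated objective: alternative
-- what changed: Replaces A's fused four-counter loop plus final sort-and-take-last by building a histogram (dict) of displacement vectors between consecutive positions once, then reading the four alignment lengths off the histogram (diagonals as direct dict lookups, horizontal/vertical as filtered sums over the histogram items) and taking a direct max.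
import Mathlib
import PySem

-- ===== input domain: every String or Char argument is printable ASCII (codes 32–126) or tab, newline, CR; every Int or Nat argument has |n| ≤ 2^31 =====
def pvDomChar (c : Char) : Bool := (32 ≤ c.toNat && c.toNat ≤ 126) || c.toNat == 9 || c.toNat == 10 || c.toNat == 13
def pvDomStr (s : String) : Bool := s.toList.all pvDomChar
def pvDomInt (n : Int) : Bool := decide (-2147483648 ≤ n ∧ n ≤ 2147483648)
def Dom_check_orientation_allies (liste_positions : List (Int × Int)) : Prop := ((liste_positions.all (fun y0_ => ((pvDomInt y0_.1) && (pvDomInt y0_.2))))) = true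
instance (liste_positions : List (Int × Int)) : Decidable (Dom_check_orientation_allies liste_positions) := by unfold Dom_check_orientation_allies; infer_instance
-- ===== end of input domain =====

-- B replaces A's fused four-counter loop + sort-and-take-last by a histogram (dict) of
-- displacement vectors between consecutive positions, from which the four alignment
-- lengths are read off (dict lookups / filtered sums) and maxed (objective: alternative).

-- ===== PORT A =====
-- the while loop: state (compteur_vertical, compteur_horizontal, compteur_diago_montante,
-- compteur_diago_descendante); couple_initial is carried along, idx becomes structural recursion
def pvALoop : List (Int × Int) → (Int × Int) → Int × Int × Int × Int → Int × Int × Int × Int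
  | [], _, st => st
  | t :: rest, c, (cv, ch, cdm, cdd) =>
      let ch' := if t.1 = c.1 then ch + 1 else ch
      let cv' := if t.1 = c.1 then cv else if t.2 = c.2 then cv + 1 else cv
      let cdm' := if (t.1 - 1 = c.1 ∧ t.2 + 1 = c.2) ∨ (t.1 + 1 = c.1 ∧ t.2 - 1 = c.2)
                  then cdm + 1 else cdm
      let cdd' := if ¬ ((t.1 - 1 = c.1 ∧ t.2 + 1 = c.2) ∨ (t.1 + 1 = c.1 ∧ t.2 - 1 = c.2)) ∧
                    ((t.1 - 1 = c.1 ∧ t.2 - 1 = c.2) ∨ (t.1 + 1 = c.1 ∧ t.2 + 1 = c.2))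
                  then cdd + 1 else cdd
      pvALoop rest t (cv', ch', cdm', cdd')

def check_orientation_allies (liste_positions : List (Int × Int)) : Int :=
  match liste_positions with
  | [] => 0  -- Python raises IndexError here (liste_positions[0]); excluded by Pre_
  | c0 :: rest =>
      let st := pvALoop rest c0 (1, 1, 1, 1)
      -- liste_longueurs = [vertical, horizontal, descendante, montante]; sort; return [-1]
      let lens := PySem.List.sorted [st.1, st.2.1, st.2.2.2, st.2.2.1] (fun x => x) false
      (PySem.List.pyGet? lens (-1)).getD 0

-- ===== PORT B =====
-- the for loop: histo[d] = histo.get(d, 0) + 1 over the displacement vectors, prev carried along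
def pvBLoop : List (Int × Int) → (Int × Int) → PySem.Dict (Int × Int) Int → PySem.Dict (Int × Int) Int
  | [], _, h => h
  | cur :: rest, prev, h =>
      let d := (cur.1 - prev.1, cur.2 - prev.2)
      pvBLoop rest cur (h.insert d (h.getD d 0 + 1))

def check_orientation_allies_alt (liste_positions : List (Int × Int)) : Int :=
  match liste_positions with
  | [] => 0  -- Python raises IndexError here (liste_positions[0]); excluded by Pre_
  | prev0 :: _ =>
      let histo := pvBLoop (PySem.List.slice liste_positions (some 1) none) prev0 PySem.Dict.empty
      let horizontal : Int := 1 + ((histo.items.filter (fun p => p.1.1 == 0)).map (·.2)).sum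
      let vertical : Int := 1 + ((histo.items.filter (fun p => p.1.1 != 0 && p.1.2 == 0)).map (·.2)).sum
      let montante : Int := 1 + histo.getD (1, -1) 0 + histo.getD (-1, 1) 0
      let descendante : Int := 1 + histo.getD (1, 1) 0 + histo.getD (-1, -1) 0
      max vertical (max horizontal (max descendante montante))

-- ===== PRECONDITION & SPEC =====
-- Pre_ excludes only the empty list, on which both A and B raise IndexError (liste_positions[0]).
def Pre_check_orientation_allies (liste_positions : List (Int × Int)) : Prop :=
  liste_positions ≠ []
instance (liste_positions : List (Int × Int)) : Decidable (Pre_check_orientation_allies liste_positions) := by unfold Pre_check_orientation_allies; infer_instance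
def pvWitness_check_orientation_allies : (List (Int × Int)) := [(0, 0), (1, 1), (2, 2)]

def Spec_check_orientation_allies (liste_positions : List (Int × Int)) (out : Int) : Prop := out = check_orientation_allies_alt liste_positions
instance (liste_positions : List (Int × Int)) (out : Int) : Decidable (Spec_check_orientation_allies liste_positions out) := by unfold Spec_check_orientation_allies; infer_instance

-- ===== CLAIM =====
def Claim_equal_check_orientation_allies : Prop := ∀ (liste_positions : List (Int × Int)), Dom_check_orientation_allies liste_positions → Pre_check_orientation_allies liste_positions → Spec_check_orientation_allies liste_positions (check_orientation_allies liste_positions)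

-- ===== LEMMAS AND PROOFS =====

-- last element of the 4-element sorted list is the max of the four
theorem pv_sorted4_last (a b c d : Int) :
    (PySem.List.pyGet? (PySem.List.sorted [a, b, c, d] (fun x => x) false) (-1)).getD 0
      = max a (max b (max c d)) := by
  have hperm := PySem.List.sorted_perm (xs := [a, b, c, d]) (key := fun x => x) (rev := false)
  have hpw := PySem.List.sorted_pairwise (xs := [a, b, c, d]) (key := fun x => x)
  set s := PySem.List.sorted [a, b, c, d] (fun x => x) false with hs
  have hl : s.length = 4 := hperm.length_eq
  obtain ⟨p, q, r, t, hspl⟩ : ∃ p q r t, s = [p, q, r, t] := by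
    match s, hl with
    | [p, q, r, t], _ => exact ⟨p, q, r, t, rfl⟩
  rw [hspl]
  rw [hspl] at hpw hperm
  simp only [List.pairwise_cons, List.mem_cons, List.not_mem_nil, or_false, List.mem_singleton,
    forall_eq_or_imp, forall_eq, List.Pairwise.nil, and_true] at hpw
  obtain ⟨⟨hpq, hpr, hpt⟩, ⟨hqr, hqt⟩, hrt⟩ := hpw
  have ht : t ∈ ([a, b, c, d] : List Int) := hperm.mem_iff.mp (by simp)
  have ha : a ∈ ([p, q, r, t] : List Int) := hperm.mem_iff.mpr (by simp)
  have hb : b ∈ ([p, q, r, t] : List Int) := hperm.mem_iff.mpr (by simp)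
  have hc : c ∈ ([p, q, r, t] : List Int) := hperm.mem_iff.mpr (by simp)
  have hd : d ∈ ([p, q, r, t] : List Int) := hperm.mem_iff.mpr (by simp)
  simp only [List.mem_cons, List.mem_singleton, List.not_mem_nil, or_false] at ht ha hb hc hd
  have hlast : (PySem.List.pyGet? ([p, q, r, t] : List Int) (-1)).getD 0 = t := by
    simp [PySem.List.pyGet?, PySem.List.pyIdx?]
  rw [hlast]
  have hat : a ≤ t := by rcases ha with h | h | h | h <;> omega
  have hbt : b ≤ t := by rcases hb with h | h | h | h <;> omega
  have hct : c ≤ t := by rcases hc with h | h | h | h <;> omega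
  have hdt : d ≤ t := by rcases hd with h | h | h | h <;> omega
  rcases ht with h | h | h | h <;> simp only [max_def] <;> split_ifs <;> omega

-- proof-side helpers: the per-pair conditions of A and the displacement list B histograms
def pvMonteP (c t : Int × Int) : Bool :=
  (t.1 - 1 == c.1 && t.2 + 1 == c.2) || (t.1 + 1 == c.1 && t.2 - 1 == c.2)

def pvDescendP (c t : Int × Int) : Bool :=
  (t.1 - 1 == c.1 && t.2 - 1 == c.2) || (t.1 + 1 == c.1 && t.2 + 1 == c.2)

def pvDeltas : List (Int × Int) → (Int × Int) → List (Int × Int)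
  | [], _ => []
  | t :: rest, c => (t.1 - c.1, t.2 - c.2) :: pvDeltas rest t

theorem pvBLoop_eq_foldl (rest : List (Int × Int)) :
    ∀ (c : Int × Int) (h : PySem.Dict (Int × Int) Int),
      pvBLoop rest c h =
        (pvDeltas rest c).foldl (fun h d => h.insert d (h.getD d 0 + 1)) h := by
  induction rest with
  | nil => intro c h; rfl
  | cons t rest ih => intro c h; simp [pvBLoop, pvDeltas, ih]

theorem pvDeltas_eq_map (rest : List (Int × Int)) :
    ∀ (c : Int × Int),
      pvDeltas rest c =
        ((c :: rest).zip rest).map (fun pq => (pq.2.1 - pq.1.1, pq.2.2 - pq.1.2)) := by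
  induction rest with
  | nil => intro c; rfl
  | cons t rest ih => intro c; simp [pvDeltas, ih t]

-- sum of an equality indicator over a nodup list
theorem pv_sum_indicator {A : Type} [BEq A] [LawfulBEq A] (a : A) (L : List A) (hnd : L.Nodup) :
    (L.map (fun k => if a == k then (1 : Int) else 0)).sum = if L.elem a then (1 : Int) else 0 := by
  induction L with
  | nil => simp
  | cons b L ih =>
      simp only [List.nodup_cons] at hnd
      by_cases hab : a = b
      · subst hab
        have hnm : a ∉ L := hnd.1
        have h0 : (L.map (fun k => if a == k then (1 : Int) else 0)).sum = 0 := by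
          rw [ih hnd.2]; simp [List.elem_iff, hnm]
        simp [h0, List.elem_iff]
      · have hne : (a == b) = false := by simp [hab]
        simp [List.map_cons, List.sum_cons, hne, ih hnd.2, List.elem_iff, hab]

-- filtered sum of counts over a nodup covering list = countP
theorem pv_sum_count_filter {A : Type} [BEq A] [LawfulBEq A] (P : A → Bool) (L ds : List A)
    (hnd : L.Nodup) (hsub : ∀ x ∈ ds, x ∈ L) :
    ((L.filter P).map (fun k => (ds.count k : Int))).sum = (ds.countP P : Int) := by
  induction ds with
  | nil => simp
  | cons a ds ih =>
      have hsub' : ∀ x ∈ ds, x ∈ L := fun x hx => hsub x (List.mem_cons_of_mem a hx)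
      have hcount : ∀ k ∈ L.filter P, ((a :: ds).count k : Int) =
          (ds.count k : Int) + (if a == k then (1 : Int) else 0) := by
        intro k _
        by_cases h : a = k
        · subst h; simp [List.count_cons]
        · have h1 : (a == k) = false := by simp [h]
          have h2 : (k == a) = false := by simp [Ne.symm h]
          simp [List.count_cons, h1, h2]
      calc ((L.filter P).map (fun k => ((a :: ds).count k : Int))).sum
          = ((L.filter P).map (fun k => (ds.count k : Int) + (if a == k then (1:Int) else 0))).sum := by
            exact congrArg List.sum (List.map_congr_left hcount)
        _ = ((L.filter P).map (fun k => (ds.count k : Int))).sum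
              + ((L.filter P).map (fun k => if a == k then (1:Int) else 0)).sum := by
            rw [← List.sum_map_add]
        _ = (ds.countP P : Int) + (if (L.filter P).elem a then (1:Int) else 0) := by
            rw [ih hsub', pv_sum_indicator a (L.filter P) (hnd.filter P)]
        _ = ((a :: ds).countP P : Int) := by
            have haL : a ∈ L := hsub a List.mem_cons_self
            by_cases hPa : P a = true <;>
              simp [List.countP_cons, hPa, List.elem_iff, List.mem_filter, haL] <;>
                push_cast <;> ring

-- countP of a two-point membership predicate = sum of the two counts (distinct points)
theorem pv_countP_pair {A : Type} [BEq A] [LawfulBEq A] (ds : List A) (a b : A) (hab : a ≠ b) :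
    (ds.countP (fun d => d == a || d == b) : Int) = (ds.count a : Int) + (ds.count b : Int) := by
  induction ds with
  | nil => simp
  | cons x ds ih =>
      by_cases hxa : x = a <;> by_cases hxb : x = b
      · exact absurd (hxa.symm.trans hxb) hab
      · subst hxa
        simp [List.countP_cons, List.count_cons, hxb, ih]; omega
      · subst hxb
        simp [List.countP_cons, List.count_cons, hxa, ih]; omega
      · simp [List.countP_cons, List.count_cons, hxa, hxb, ih]

theorem pvMonteP_iff (c t : Int × Int) :
    pvMonteP c t = true ↔ ((t.1 - 1 = c.1 ∧ t.2 + 1 = c.2) ∨ (t.1 + 1 = c.1 ∧ t.2 - 1 = c.2)) := by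
  simp [pvMonteP]

theorem pvDescendP_iff (c t : Int × Int) :
    pvDescendP c t = true ↔ ((t.1 - 1 = c.1 ∧ t.2 - 1 = c.2) ∨ (t.1 + 1 = c.1 ∧ t.2 + 1 = c.2)) := by
  simp [pvDescendP]

-- A's loop equals base counters plus the four pair counts over (c :: rest).zip rest
theorem pv_loop_counts (rest : List (Int × Int)) :
    ∀ (c : Int × Int) (cv ch cdm cdd : Int),
      pvALoop rest c (cv, ch, cdm, cdd) =
        (cv + (((c :: rest).zip rest).countP
                (fun pq => pq.2.1 != pq.1.1 && pq.2.2 == pq.1.2) : Int),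
         ch + (((c :: rest).zip rest).countP (fun pq => pq.2.1 == pq.1.1) : Int),
         cdm + (((c :: rest).zip rest).countP (fun pq => pvMonteP pq.1 pq.2) : Int),
         cdd + (((c :: rest).zip rest).countP
                (fun pq => !(pvMonteP pq.1 pq.2) && pvDescendP pq.1 pq.2) : Int)) := by
  induction rest with
  | nil => intro c cv ch cdm cdd; simp [pvALoop]
  | cons t rest ih =>
      intro c cv ch cdm cdd
      have hzip : (c :: t :: rest).zip (t :: rest) = (c, t) :: (t :: rest).zip rest := rfl
      rw [hzip]
      simp only [pvALoop]
      rw [ih]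
      simp only [List.countP_cons, Prod.mk.injEq]
      refine ⟨?_, ?_, ?_, ?_⟩
      · by_cases h1 : t.1 = c.1 <;> by_cases h2 : t.2 = c.2 <;>
          simp [h1, h2] <;> push_cast <;> ring
      · by_cases h1 : t.1 = c.1 <;> simp [h1] <;> push_cast <;> ring
      · by_cases hm : (t.1 - 1 = c.1 ∧ t.2 + 1 = c.2) ∨ (t.1 + 1 = c.1 ∧ t.2 - 1 = c.2)
        · have hmb : pvMonteP c t = true := (pvMonteP_iff c t).mpr hm
          simp [hm, hmb]; push_cast; ring
        · have hmb : pvMonteP c t = false := by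
            rw [Bool.eq_false_iff]; intro h; exact hm ((pvMonteP_iff c t).mp h)
          simp [hm, hmb]
      · by_cases hm : (t.1 - 1 = c.1 ∧ t.2 + 1 = c.2) ∨ (t.1 + 1 = c.1 ∧ t.2 - 1 = c.2) <;>
          by_cases hdp : (t.1 - 1 = c.1 ∧ t.2 - 1 = c.2) ∨ (t.1 + 1 = c.1 ∧ t.2 + 1 = c.2)
        all_goals
          first
          | (have hmb : pvMonteP c t = true := (pvMonteP_iff c t).mpr ‹_›
             have hdb : pvDescendP c t = true := (pvDescendP_iff c t).mpr ‹_›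
             simp [hm, hdp, hmb, hdb] <;> push_cast <;> ring)
          | (have hmb : pvMonteP c t = true := (pvMonteP_iff c t).mpr ‹_›
             simp [hm, hdp, hmb] <;> push_cast <;> ring)
          | (have hmb : pvMonteP c t = false := by
               rw [Bool.eq_false_iff]; intro h; exact hm ((pvMonteP_iff c t).mp h)
             have hdb : pvDescendP c t = true := (pvDescendP_iff c t).mpr ‹_›
             simp [hm, hdp, hmb, hdb] <;> push_cast <;> ring)
          | (have hmb : pvMonteP c t = false := by
               rw [Bool.eq_false_iff]; intro h; exact hm ((pvMonteP_iff c t).mp h)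
             have hdb : pvDescendP c t = false := by
               rw [Bool.eq_false_iff]; intro h; exact hdp ((pvDescendP_iff c t).mp h)
             simp [hm, hdp, hmb, hdb] <;> push_cast <;> ring)
          | (simp [hm, hdp] <;> push_cast <;> ring)

-- ===== VERDICT =====
theorem check_orientation_allies_spec : Claim_equal_check_orientation_allies := by
  intro l _ hpre
  unfold Spec_check_orientation_allies
  obtain ⟨c0, rest, rfl⟩ : ∃ c0 rest, l = c0 :: rest := by
    cases l with
    | nil => exact absurd rfl hpre
    | cons a b => exact ⟨a, b, rfl⟩
  simp only [check_orientation_allies, check_orientation_allies_alt]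
  have hslice : PySem.List.slice (c0 :: rest) (some 1) none = rest := by
    simpa using PySem.List.slice_from_natCast (xs := c0 :: rest) (a := 1)
  rw [hslice, pvBLoop_eq_foldl, PySem.Dict.foldl_insert_getD_add_one_eq_counter]
  rw [pv_loop_counts rest c0 1 1 1 1, pv_sorted4_last]
  set ds := pvDeltas rest c0 with hds
  have hmap := pvDeltas_eq_map rest c0
  set pairs := (c0 :: rest).zip rest with hpairs
  have hndL : (PySem.Set.ofList ds).Nodup := PySem.Set.nodup_ofList ds
  have hsubL : ∀ x ∈ ds, x ∈ PySem.Set.ofList ds := fun x hx => (PySem.Set.mem_ofList ds x).mpr hx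
  -- horizontal
  have hH : (((PySem.Dict.counter ds).items.filter (fun p => p.1.1 == 0)).map (·.2)).sum
      = (pairs.countP (fun pq => pq.2.1 == pq.1.1) : Int) := by
    rw [PySem.Dict.items_counter, List.filter_map, List.map_map]
    have hsum := pv_sum_count_filter (fun k : Int × Int => k.1 == 0) (PySem.Set.ofList ds) ds hndL hsubL
    simp only [Function.comp_def]
    rw [hsum, hds, hmap, List.countP_map]
    refine congrArg (fun n : Nat => (n : Int)) (List.countP_congr ?_)
    intro pq _
    simp only [Function.comp, beq_iff_eq]
    omega
  -- vertical
  have hV : (((PySem.Dict.counter ds).items.filter (fun p => p.1.1 != 0 && p.1.2 == 0)).map (·.2)).sum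
      = (pairs.countP (fun pq => pq.2.1 != pq.1.1 && pq.2.2 == pq.1.2) : Int) := by
    rw [PySem.Dict.items_counter, List.filter_map, List.map_map]
    have hsum := pv_sum_count_filter (fun k : Int × Int => k.1 != 0 && k.2 == 0) (PySem.Set.ofList ds) ds hndL hsubL
    simp only [Function.comp_def]
    rw [hsum, hds, hmap, List.countP_map]
    refine congrArg (fun n : Nat => (n : Int)) (List.countP_congr ?_)
    intro pq _
    simp only [Function.comp, beq_iff_eq, bne_iff_ne, ne_eq, Bool.and_eq_true, decide_eq_true_eq]
    omega
  -- montante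
  have hM : (PySem.Dict.counter ds).getD ((1 : Int), (-1 : Int)) 0 + (PySem.Dict.counter ds).getD ((-1 : Int), (1 : Int)) 0
      = (pairs.countP (fun pq => pvMonteP pq.1 pq.2) : Int) := by
    rw [PySem.Dict.getD_counter, PySem.Dict.getD_counter,
      ← pv_countP_pair ds ((1 : Int), (-1 : Int)) ((-1 : Int), (1 : Int)) (by decide)]
    rw [hds, hmap, List.countP_map]
    refine congrArg (fun n : Nat => (n : Int)) (List.countP_congr ?_)
    intro pq _
    simp only [Function.comp, pvMonteP, Prod.mk.injEq, Bool.or_eq_true, decide_eq_true_eq,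
      Bool.and_eq_true, beq_iff_eq]
    omega
  -- descendante
  have hD : (PySem.Dict.counter ds).getD ((1 : Int), (1 : Int)) 0 + (PySem.Dict.counter ds).getD ((-1 : Int), (-1 : Int)) 0
      = (pairs.countP (fun pq => !(pvMonteP pq.1 pq.2) && pvDescendP pq.1 pq.2) : Int) := by
    rw [PySem.Dict.getD_counter, PySem.Dict.getD_counter,
      ← pv_countP_pair ds ((1 : Int), (1 : Int)) ((-1 : Int), (-1 : Int)) (by decide)]
    rw [hds, hmap, List.countP_map]
    refine congrArg (fun n : Nat => (n : Int)) (List.countP_congr ?_)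
    intro pq _
    simp only [Function.comp, pvMonteP, pvDescendP, Prod.mk.injEq, Bool.or_eq_true,
      decide_eq_true_eq, Bool.and_eq_true, Bool.not_eq_true', Bool.or_eq_false_iff,
      Bool.and_eq_false_iff, beq_iff_eq, beq_eq_false_iff_ne, ne_eq]
    omega
  rw [hH, hV]
  simp only [add_assoc]
  rw [hM, hD]
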